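-- pv_equiv track=rewrite | github.com/yukichi0403/Scrabuild | 動的計画法/桁DP.py | count
-- ===== SOURCE A (Python) =====
-- from itertools import product
--
-- def count(x):
--     a = str(x)
--     n = len(a)
--     #内包表記上、配列は末から書く
--     dp=[[[[[0] * 8 for _ in range(3)] for _ in range(2)] for _ in range(2)] for _ in range(n+1)]
--     dp[0][0][0][0][0] = 1
--
--     #条件に合わせてDP
--     for i, less, has3, mod3, mod8 in product(range(n), (0,1), (0,1), range(3), range(8)):
--         #lessフラグがない場合は９まで、ある場合は指定された数のi桁目までの数字を上限にループ
--         max_d = 9 if less else int(a[i])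
--         for d in range(max_d+1):
--             less_ = less or d < max_d
--             has3_ = has3 or d == 3
--             mod3_ = (mod3 + d) % 3
--             #8の倍数は下2桁が8で割り切れるかどうかで見分けられるため、mod8の値を10で乗じてd足し上げることで2桁の数字にして判定。
--             mod8_ = (mod8*10 + d) % 8
--             dp[i + 1][less_][has3_][mod3_][mod8_] += dp[i][less][has3][mod3][mod8]
--
--     #合致するものを合算
--     ret = 0
--     #lessフラグは両方足し上げる、mod８フラグは1~7まで（余りあり）を足し上げる
--     for less, mod8 in product((0,1), range(1,8)):
--             ret += dp[n][less][1][0][mod8]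
--             ret += dp[n][less][1][1][mod8]
--             ret += dp[n][less][1][2][mod8]
--             ret += dp[n][less][0][0][mod8]
--     return ret
-- ===== SOURCE B (Python) =====
-- from itertools import product
--
-- def count(x):
--     # count k in [0, x] with k % 8 != 0 and (k % 3 == 0 or '3' in str(k)),
--     # by blocks k = 1000*p + t: the block's contribution depends only on
--     # whether p contains a digit 3 and on p % 24 (t % 8 decides k % 8,
--     # (p + t) % 3 decides k % 3).
--     q, r = divmod(x + 1, 1000)
--     table = {}
--     for h, rr in product(range(2), range(24)):
--         c = 0
--         for t in range(1000):
--             v = rr * 1000 + t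
--             if v % 8 != 0 and (v % 3 == 0 or h == 1 or '3' in str(t)):
--                 c += 1
--         table[(h, rr)] = c
--     total = 0
--     for p in range(q):
--         total += table[(1 if '3' in str(p) else 0, p % 24)]
--     for t in range(r):
--         v = 1000 * q + t
--         if v % 8 != 0 and (v % 3 == 0 or '3' in str(q) or '3' in str(t)):
--             total += 1
--     return total
-- ===== Notes on version B (the rewrite author's own statement) =====
-- stated objective: alternative
-- what changed: Replaces the 5-dimensional digit DP over (position, less, has3, mod3, mod8) with blocked counting: k = 1000*p + t, a precomputed 2x24 table counting hits t in [0,1000) per (digit-3 flag of p, p mod 24), then one pass over the blocks plus a short remainder loop.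
import Mathlib
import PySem

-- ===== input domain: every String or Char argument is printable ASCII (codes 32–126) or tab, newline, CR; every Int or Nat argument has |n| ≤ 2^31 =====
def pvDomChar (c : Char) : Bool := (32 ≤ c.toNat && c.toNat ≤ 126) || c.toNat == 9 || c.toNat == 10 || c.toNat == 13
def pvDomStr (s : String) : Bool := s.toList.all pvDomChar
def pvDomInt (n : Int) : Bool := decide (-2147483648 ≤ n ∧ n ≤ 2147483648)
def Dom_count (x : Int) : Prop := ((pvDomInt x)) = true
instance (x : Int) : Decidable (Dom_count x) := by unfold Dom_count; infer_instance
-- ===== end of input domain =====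

-- B replaces the digit DP over (position, less, has3, mod3, mod8) with blocked
-- counting: k = 1000*p + t, a precomputed 2x24 residue table over t, one pass over
-- the blocks p and a short remainder loop; objective: alternative (not faster).

-- ===== PORT A =====
def count (x : Int) : Int :=
  let a := PySem.Int.toStr x
  let n := a.toList.length
  -- dp[i][less][has3][mod3][mod8]: table of entries keyed by the 5 indices, default 0;
  -- dp[0][0][0][0][0] = 1.
  let dp0 : PySem.Dict (Nat × Nat × Nat × Nat × Nat) Int :=
    PySem.Dict.empty.insert (0, 0, 0, 0, 0) 1
  -- product(range(n), (0,1), (0,1), range(3), range(8))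
  let idxs : List (Nat × Nat × Nat × Nat × Nat) :=
    (List.range n).flatMap fun i =>
      [0, 1].flatMap fun less =>
        [0, 1].flatMap fun has3 =>
          (List.range 3).flatMap fun m3 =>
            (List.range 8).map fun m8 => (i, less, has3, m3, m8)
  let dp := idxs.foldl (fun dp t =>
    let (i, less, has3, m3, m8) := t
    -- max_d = 9 if less else int(a[i]); i < n so a[i] is in range; int() succeeds under Pre_
    let maxD : Int := if less = 1 then 9 else (PySem.Int.ofChars? (PySem.Str.pyGet? a (i : Int)).toList).getD 0
    (PySem.List.pyRange 0 (maxD + 1) 1).foldl (fun dp d =>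
      let less' : Nat := if less = 1 ∨ d < maxD then 1 else 0
      let has3' : Nat := if has3 = 1 ∨ d = 3 then 1 else 0
      let m3' : Nat := (PySem.Int.mod ((m3 : Int) + d) 3).toNat
      let m8' : Nat := (PySem.Int.mod ((m8 : Int) * 10 + d) 8).toNat
      dp.modify (i + 1, less', has3', m3', m8') 0
        (· + dp.getD (i, less, has3, m3, m8) 0)) dp) dp0
  -- for less, mod8 in product((0,1), range(1,8)): ret += the four matching dp[n] entries
  ([0, 1].flatMap fun less => (PySem.List.pyRange 1 8 1).map fun m8 => (less, m8.toNat)).foldl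
    (fun ret p =>
      ret + dp.getD (n, p.1, 1, 0, p.2) 0 + dp.getD (n, p.1, 1, 1, p.2) 0
          + dp.getD (n, p.1, 1, 2, p.2) 0 + dp.getD (n, p.1, 0, 0, p.2) 0) 0

-- ===== PORT B =====
def count_alt (x : Int) : Int :=
  let q := PySem.Int.floordiv (x + 1) 1000
  let r := PySem.Int.mod (x + 1) 1000
  let table := ((PySem.List.pyRange 0 2 1).flatMap fun h =>
      (PySem.List.pyRange 0 24 1).map fun rr => (h, rr)).foldl
    (fun tb (pr : Int × Int) =>
      let c := (PySem.List.pyRange 0 1000 1).foldl (fun c t =>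
        let v := pr.2 * 1000 + t
        if PySem.Int.mod v 8 ≠ 0 ∧ (PySem.Int.mod v 3 = 0 ∨ pr.1 = 1 ∨ PySem.Str.isIn "3" (PySem.Int.toStr t)) then c + 1 else c) (0 : Int)
      tb.insert (pr.1, pr.2) c) (PySem.Dict.empty : PySem.Dict (Int × Int) Int)
  let total := (PySem.List.pyRange 0 q 1).foldl (fun tot p =>
      tot + table.getD ((if PySem.Str.isIn "3" (PySem.Int.toStr p) then (1 : Int) else 0), PySem.Int.mod p 24) 0) 0
  (PySem.List.pyRange 0 r 1).foldl (fun tot t =>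
      let v := 1000 * q + t
      if PySem.Int.mod v 8 ≠ 0 ∧ (PySem.Int.mod v 3 = 0 ∨ PySem.Str.isIn "3" (PySem.Int.toStr q) ∨ PySem.Str.isIn "3" (PySem.Int.toStr t)) then tot + 1 else tot) total

-- ===== PRECONDITION & SPEC =====
-- Pre_ excludes negative x, on which A raises ValueError (int('-') on the sign character).
def Pre_count (x : Int) : Prop := 0 ≤ x
instance (x : Int) : Decidable (Pre_count x) := by unfold Pre_count; infer_instance
def pvWitness_count : Int := 130

def Spec_count (x : Int) (out : Int) : Prop := out = count_alt x
instance (x : Int) (out : Int) : Decidable (Spec_count x out) := by unfold Spec_count; infer_instance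

-- ===== CLAIM (what is proved, stated in full; the proofs are below) =====
def Claim_equal_count : Prop := ∀ (x : Int), Dom_count x → Pre_count x → Spec_count x (count x)

-- ===== LEMMAS AND PROOFS =====
set_option maxHeartbeats 1000000
set_option maxRecDepth 8192

-- The digit-DP state of a number: (has a digit 3, value mod 3, value mod 8).
def stOf (m : Nat) : Nat × Nat × Nat :=
  ((if 3 ∈ Nat.digits 10 m then 1 else 0), m % 3, m % 8)

-- Appending decimal digit d to a number with state s yields state stStep s d.
def stStep (s : Nat × Nat × Nat) (d : Nat) : Nat × Nat × Nat :=
  ((if s.1 = 1 ∨ d = 3 then 1 else 0), (s.2.1 + d) % 3, (s.2.2 * 10 + d) % 8)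

-- How many m < N have state s.
def cnt (N : Nat) (s : Nat × Nat × Nat) : Int :=
  ((List.range N).countP fun m => decide (stOf m = s) : Nat)

-- How many digits d < 10 step s to π.
def stw (s π : Nat × Nat × Nat) : Int :=
  ((List.range 10).countP fun d => decide (stStep s d = π) : Nat)

-- All 48 (has3, mod3, mod8) states.
def sts : List (Nat × Nat × Nat) :=
  [0, 1].flatMap fun h => (List.range 3).flatMap fun m3 => (List.range 8).map fun m8 => (h, m3, m8)

-- The states A's final loop sums: not divisible by 8, and (has3 or divisible by 3).
def goodSts : List (Nat × Nat × Nat) :=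
  (List.range' 1 7).flatMap fun m8 => [(1, 0, m8), (1, 1, m8), (1, 2, m8), (0, 0, m8)]

abbrev goodP (k : Nat) : Prop := k % 8 ≠ 0 ∧ (k % 3 = 0 ∨ 3 ∈ Nat.digits 10 k)

-- Decimal digits of m, most significant first, exactly as str(m) prints them.
def dsOf (m : Nat) : List Nat := if m = 0 then [0] else (Nat.digits 10 m).reverse

-- Value of the first i digits.
def pref (l : List Nat) (i : Nat) : Nat := (l.take i).foldl (fun acc d => 10 * acc + d) 0

-- Mirrors of A's loop pieces (definitionally equal to the lambdas inside `count`).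
def blockIdx (i : Nat) : List (Nat × Nat × Nat × Nat × Nat) :=
  [0, 1].flatMap fun less =>
    [0, 1].flatMap fun has3 =>
      (List.range 3).flatMap fun m3 =>
        (List.range 8).map fun m8 => (i, less, has3, m3, m8)

def bodyA (a : String) (dp : PySem.Dict (Nat × Nat × Nat × Nat × Nat) Int)
    (t : Nat × Nat × Nat × Nat × Nat) : PySem.Dict (Nat × Nat × Nat × Nat × Nat) Int :=
  let (i, less, has3, m3, m8) := t
  let maxD : Int := if less = 1 then 9 else (PySem.Int.ofChars? (PySem.Str.pyGet? a (i : Int)).toList).getD 0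
  (PySem.List.pyRange 0 (maxD + 1) 1).foldl (fun dp d =>
    let less' : Nat := if less = 1 ∨ d < maxD then 1 else 0
    let has3' : Nat := if has3 = 1 ∨ d = 3 then 1 else 0
    let m3' : Nat := (PySem.Int.mod ((m3 : Int) + d) 3).toNat
    let m8' : Nat := (PySem.Int.mod ((m8 : Int) * 10 + d) 8).toNat
    dp.modify (i + 1, less', has3', m3', m8') 0
      (· + dp.getD (i, less, has3, m3, m8) 0)) dp

def dpInit : PySem.Dict (Nat × Nat × Nat × Nat × Nat) Int :=
  PySem.Dict.empty.insert (0, 0, 0, 0, 0) 1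

def dpUpto (a : String) (i : Nat) : PySem.Dict (Nat × Nat × Nat × Nat × Nat) Int :=
  ((List.range i).flatMap blockIdx).foldl (bodyA a) dpInit

-- The transition on the four state coordinates, as the port computes it on an Int digit.
def trFun (less : Nat) (maxD : Int) (has3 m3 m8 : Nat) (d : Int) : Nat × Nat × Nat × Nat :=
  ((if less = 1 ∨ d < maxD then 1 else 0), (if has3 = 1 ∨ d = 3 then 1 else 0),
   (PySem.Int.mod ((m3 : Int) + d) 3).toNat, (PySem.Int.mod ((m8 : Int) * 10 + d) 8).toNat)

def dVal (a : String) (i : Nat) : Int :=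
  (PySem.Int.ofChars? (PySem.Str.pyGet? a (i : Int)).toList).getD 0

def contribOf (a : String) (dpI : (Nat × Nat × Nat × Nat) → Int)
    (t key : Nat × Nat × Nat × Nat × Nat) : Int :=
  ((PySem.List.pyRange 0 ((if t.2.1 = 1 then 9 else dVal a t.1) + 1) 1).map
    (fun d => if key = (t.1 + 1, trFun t.2.1 (if t.2.1 = 1 then 9 else dVal a t.1)
        t.2.2.1 t.2.2.2.1 t.2.2.2.2 d) then dpI t.2 else 0)).sum

-- dp layer i as the invariant describes it: prefix < the first i digits after a (less = 1)
-- entry, or exactly the prefix after a (less = 0) entry.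
def specI (P : Nat) (s : Nat × Nat × Nat × Nat) : Int :=
  if s.1 = 1 then cnt P s.2 else (if stOf P = s.2 then 1 else 0)

lemma count_unfold (x : Int) :
    count x =
      (([0, 1].flatMap fun less => (PySem.List.pyRange 1 8 1).map fun m8 => (less, m8.toNat)).foldl
        (fun ret (p : Nat × Nat) =>
          ret + (dpUpto (PySem.Int.toStr x) (PySem.Int.toStr x).toList.length).getD (((PySem.Int.toStr x).toList.length), p.1, 1, 0, p.2) 0
              + (dpUpto (PySem.Int.toStr x) (PySem.Int.toStr x).toList.length).getD (((PySem.Int.toStr x).toList.length), p.1, 1, 1, p.2) 0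
              + (dpUpto (PySem.Int.toStr x) (PySem.Int.toStr x).toList.length).getD (((PySem.Int.toStr x).toList.length), p.1, 1, 2, p.2) 0
              + (dpUpto (PySem.Int.toStr x) (PySem.Int.toStr x).toList.length).getD (((PySem.Int.toStr x).toList.length), p.1, 0, 0, p.2) 0) 0) := by
  unfold count dpUpto bodyA blockIdx dpInit
  rfl

-- ---- digit strings ----




lemma toDigitsCore_eq (f : Nat) : ∀ (n : Nat) (acc : List Char), n < f → 0 < n →
    Nat.toDigitsCore 10 f n acc = ((Nat.digits 10 n).map Nat.digitChar).reverse ++ acc := by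
  induction f with
  | zero => intro n acc h; omega
  | succ f ih =>
    intro n acc h hn
    rw [Nat.digits_def' (by norm_num) hn]
    simp only [Nat.toDigitsCore, List.map_cons, List.reverse_cons]
    by_cases h10 : n / 10 = 0
    · simp [h10, Nat.digits_def' (b := 10) (by norm_num) (show 0 < n/10*10+n%10 by omega)]
    · rw [if_neg h10, ih (n / 10) _ (by omega) (by omega)]
      simp

lemma toDigits_eq_digits (n : Nat) (hn : 0 < n) :
    Nat.toDigits 10 n = ((Nat.digits 10 n).map Nat.digitChar).reverse := by
  have := toDigitsCore_eq (n + 1) n [] (by omega) hn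
  simpa [Nat.toDigits] using this

lemma dsOf_chars (m : Nat) : Nat.toDigits 10 m = (dsOf m).map Nat.digitChar := by
  by_cases hm : m = 0
  · subst hm; rfl
  · rw [toDigits_eq_digits m (by omega)]
    simp [dsOf, hm, List.map_reverse]

lemma dsOf_lt (m : Nat) : ∀ d ∈ dsOf m, d < 10 := by
  intro d hd
  by_cases hm : m = 0
  · subst hm; simp [dsOf] at hd; omega
  · simp [dsOf, hm] at hd
    exact Nat.digits_lt_base (by norm_num) hd

lemma foldl_rev_digits (l : List Nat) (init : Nat) :
    l.reverse.foldl (fun a d => 10 * a + d) init = init * 10 ^ l.length + Nat.ofDigits 10 l := by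
  induction l generalizing init with
  | nil => simp
  | cons d t ih =>
    simp only [List.reverse_cons, List.foldl_append, List.foldl_cons, List.foldl_nil,
      Nat.ofDigits_cons, List.length_cons, ih]
    ring

lemma pref_all (m : Nat) : pref (dsOf m) (dsOf m).length = m := by
  by_cases hm : m = 0
  · subst hm; rfl
  · simp only [pref, List.take_length, dsOf, if_neg hm]
    rw [foldl_rev_digits]
    simp [Nat.ofDigits_digits]

lemma pref_succ (l : List Nat) (i : Nat) (hi : i < l.length) :
    pref l (i + 1) = 10 * pref l i + l.getD i 0 := by
  unfold pref
  rw [List.take_add_one, List.getElem?_eq_getElem hi, List.getD_eq_getElem _ _ hi]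
  rw [Option.toList_some, List.foldl_append, List.foldl_cons, List.foldl_nil]

-- ---- states ----



lemma ofChars?_digitChar (v : Nat) (hv : v < 10) :
    PySem.Int.ofChars? [Nat.digitChar v] = some (v : Int) := by
  interval_cases v <;> decide

lemma digitChar_eq_three (v : Nat) (hv : v < 10) : Nat.digitChar v = '3' ↔ v = 3 := by
  interval_cases v <;> decide

lemma mem_digits_step (m d : Nat) (hd : d < 10) :
    3 ∈ Nat.digits 10 (10 * m + d) ↔ 3 ∈ Nat.digits 10 m ∨ d = 3 := by
  by_cases h0 : 10 * m + d = 0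
  · have hm : m = 0 := by omega
    have hdd : d = 0 := by omega
    subst hm hdd; simp
  · rw [Nat.digits_def' (by norm_num : (1:Nat) < 10) (by omega)]
    have h1 : (10 * m + d) % 10 = d := by omega
    have h2 : (10 * m + d) / 10 = m := by omega
    rw [h1, h2, List.mem_cons]
    tauto

lemma stOf_step (m d : Nat) (hd : d < 10) : stOf (10 * m + d) = stStep (stOf m) d := by
  unfold stOf stStep
  refine Prod.ext ?_ (Prod.ext ?_ ?_)
  · simp only [mem_digits_step m d hd]
    by_cases h3 : 3 ∈ Nat.digits 10 m <;> by_cases hd3 : d = 3 <;> simp [h3, hd3]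
  · simp only; omega
  · simp only; omega

lemma stOf_mem_sts (m : Nat) : stOf m ∈ sts := by
  unfold stOf sts
  simp only [List.mem_flatMap, List.mem_map, List.mem_range]
  refine ⟨(if 3 ∈ Nat.digits 10 m then 1 else 0), by split <;> simp, m % 3, by omega, m % 8, by omega, rfl⟩

lemma sts_nodup : sts.Nodup := by decide
lemma goodSts_nodup : goodSts.Nodup := by decide

lemma stOf_mem_goodSts (k : Nat) : stOf k ∈ goodSts ↔ goodP k := by
  unfold stOf goodSts goodP
  have h3 : k % 3 < 3 := by omega
  have h8 : k % 8 < 8 := by omega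
  by_cases hm : 3 ∈ Nat.digits 10 k
  · simp only [hm, if_pos]
    interval_cases h : k % 3 <;> interval_cases h' : k % 8 <;> simp <;> omega
  · simp only [hm, if_neg, ite_false]
    interval_cases h : k % 3 <;> interval_cases h' : k % 8 <;> simp [hm] <;> omega

-- ---- counting ----



lemma sum_ite_single {α : Type} [DecidableEq α] (L : List α) (a : α) (f : α → Int)
    (hnd : L.Nodup) (ha : a ∈ L) :
    (L.map fun s => if a = s then f s else 0).sum = f a := by
  induction L with
  | nil => simp at ha
  | cons x t ih =>
    simp only [List.map_cons, List.sum_cons]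
    rcases List.mem_cons.mp ha with h | h
    · subst h
      rw [if_pos rfl]
      have : ∀ s ∈ t, (if a = s then f s else 0) = 0 := by
        intro s hs
        have : a ≠ s := fun he => (List.nodup_cons.mp hnd).1 (he ▸ hs)
        simp [this]
      rw [List.sum_eq_zero (by simpa using fun s hs => this s hs), add_zero]
    · have hax : a ≠ x := fun he => (List.nodup_cons.mp hnd).1 (he ▸ h)
      rw [if_neg hax, zero_add]
      exact ih (List.nodup_cons.mp hnd).2 h

lemma sum_ite_mem {α : Type} [DecidableEq α] (L : List α) (a : α) (hnd : L.Nodup) :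
    (L.map fun s => if a = s then (1 : Int) else 0).sum = if a ∈ L then 1 else 0 := by
  by_cases ha : a ∈ L
  · rw [sum_ite_single L a _ hnd ha, if_pos ha]
  · rw [if_neg ha, List.sum_eq_zero]
    intro x hx
    simp only [List.mem_map] at hx
    obtain ⟨s, hs, rfl⟩ := hx
    have : a ≠ s := fun he => ha (he ▸ hs)
    simp [this]

lemma sum_map_split {α : Type} (L : List α) (f g h : α → Int) (hf : ∀ a ∈ L, f a = g a + h a) :
    (L.map f).sum = (L.map g).sum + (L.map h).sum := by
  induction L with
  | nil => simp
  | cons x t ih =>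
    simp only [List.map_cons, List.sum_cons]
    rw [hf x (by simp), ih (fun a ha => hf a (by simp [ha]))]
    ring

lemma sum_map_ite_const {α : Type} (L : List α) (p : α → Prop) [DecidablePred p] (c : Int) :
    (L.map fun a => if p a then c else 0).sum = c * ((L.countP fun a => decide (p a) : Nat) : Int) := by
  induction L with
  | nil => simp
  | cons x t ih =>
    simp only [List.map_cons, List.sum_cons, List.countP_cons, ih]
    by_cases hx : p x <;> simp [hx] <;> push_cast <;> ring

-- cnt lemmas
lemma cnt_zero (s : Nat × Nat × Nat) : cnt 0 s = 0 := rfl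

lemma cnt_add (N K : Nat) (s : Nat × Nat × Nat) :
    cnt (N + K) s = cnt N s + ((List.range K).countP fun j => decide (stOf (N + j) = s) : Nat) := by
  unfold cnt
  rw [List.range_add, List.countP_append, List.countP_map]
  push_cast
  rfl

lemma cnt_succ (N : Nat) (s : Nat × Nat × Nat) :
    cnt (N + 1) s = cnt N s + (if stOf N = s then 1 else 0) := by
  unfold cnt
  rw [List.range_succ, List.countP_append]
  by_cases h : stOf N = s <;> simp [h]

lemma cnt_mulD (P D : Nat) (hD : D ≤ 10) (s : Nat × Nat × Nat) :
    cnt (10 * P + D) s = cnt (10 * P) s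
      + ((List.range D).countP fun d => decide (stStep (stOf P) d = s) : Nat) := by
  rw [cnt_add (10 * P) D s]
  congr 2
  apply List.countP_congr
  intro d hd
  have hd10 : d < 10 := by have := List.mem_range.mp hd; omega
  rw [stOf_step P d hd10]

lemma cnt_ten (P : Nat) (π : Nat × Nat × Nat) :
    cnt (10 * P) π = (sts.map fun s => cnt P s * stw s π).sum := by
  induction P with
  | zero => simp [cnt_zero, List.sum_eq_zero]
  | succ P ih =>
    have h1 : 10 * (P + 1) = 10 * P + 10 := by ring
    rw [h1, cnt_mulD P 10 (le_refl 10) π, ih]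
    have hR : (sts.map fun s => cnt (P + 1) s * stw s π).sum
        = (sts.map fun s => cnt P s * stw s π).sum + stw (stOf P) π := by
      rw [sum_map_split sts (fun s => cnt (P + 1) s * stw s π) (fun s => cnt P s * stw s π)
        (fun s => if stOf P = s then stw s π else 0)
        (by intro s _
            show cnt (P + 1) s * stw s π = cnt P s * stw s π + (if stOf P = s then stw s π else 0)
            rw [cnt_succ]
            by_cases h : stOf P = s <;> simp [h] <;> ring)]
      rw [sum_ite_single sts (stOf P) (fun s => stw s π) sts_nodup (stOf_mem_sts P)]
    rw [hR]
    unfold stw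
    ring

lemma cnt_sum' (N : Nat) (L : List (Nat × Nat × Nat)) (hnd : L.Nodup) :
    (L.map fun s => cnt N s).sum = ((List.range N).countP fun m => decide (stOf m ∈ L) : Nat) := by
  induction N with
  | zero => simp [cnt_zero, List.sum_eq_zero]
  | succ N ih =>
    rw [sum_map_split L _ (fun s => cnt N s) (fun s => if stOf N = s then 1 else 0)
      (by intro s _
          show cnt (N + 1) s = cnt N s + (if stOf N = s then (1:Int) else 0)
          rw [cnt_succ])]
    rw [ih, sum_ite_mem L (stOf N) hnd, List.range_succ, List.countP_append]
    simp only [List.countP_cons, List.countP_nil]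
    by_cases h : stOf N ∈ L <;> simp [h]

-- ---- dict folds ----



lemma foldl_modify_inner (i : Nat) (src : Nat × Nat × Nat × Nat) (tr : Int → Nat × Nat × Nat × Nat)
    (dr : List Int) :
    ∀ (dp : PySem.Dict (Nat × Nat × Nat × Nat × Nat) Int) (key : Nat × Nat × Nat × Nat × Nat),
    (dr.foldl (fun dp d => dp.modify (i + 1, tr d) 0 (· + dp.getD (i, src) 0)) dp).getD key 0
      = dp.getD key 0 + (dr.map fun d => if key = (i + 1, tr d) then dp.getD (i, src) 0 else 0).sum := by
  induction dr with
  | nil => intro dp key; simp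
  | cons d rest ih =>
    intro dp key
    simp only [List.foldl_cons, List.map_cons, List.sum_cons]
    have hne : ((i, src) : Nat × Nat × Nat × Nat × Nat) ≠ (i + 1, tr d) := by
      intro h
      have := congrArg Prod.fst h
      simp at this
    have hpres : (dp.modify (i + 1, tr d) 0 (· + dp.getD (i, src) 0)).getD (i, src) 0
        = dp.getD (i, src) 0 := PySem.Dict.getD_modify_of_ne dp 0 _ hne
    rw [ih, hpres, PySem.Dict.getD_modify]
    by_cases hk : key = (i + 1, tr d)
    · rw [if_pos hk, if_pos (by rw [hk]), hk]; ring
    · rw [if_neg hk, if_neg hk]; ring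

lemma bodyA_getD (a : String) (i less has3 m3 m8 : Nat)
    (dp : PySem.Dict (Nat × Nat × Nat × Nat × Nat) Int) (key : Nat × Nat × Nat × Nat × Nat) :
    (bodyA a dp (i, less, has3, m3, m8)).getD key 0
      = dp.getD key 0 + contribOf a (fun s => dp.getD (i, s) 0) (i, less, has3, m3, m8) key := by
  exact foldl_modify_inner i (less, has3, m3, m8)
    (fun d => trFun less (if less = 1 then 9 else dVal a i) has3 m3 m8 d)
    (PySem.List.pyRange 0 ((if less = 1 then 9 else dVal a i) + 1) 1) dp key

lemma contribOf_ne (a : String) (dpI : (Nat × Nat × Nat × Nat) → Int)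
    (t key : Nat × Nat × Nat × Nat × Nat) (hk : key.1 ≠ t.1 + 1) :
    contribOf a dpI t key = 0 := by
  unfold contribOf
  apply List.sum_eq_zero
  intro v hv
  simp only [List.mem_map] at hv
  obtain ⟨d, _, rfl⟩ := hv
  rw [if_neg]
  intro h
  exact hk (by rw [h])

lemma foldl_bodyA_getD (a : String) (i : Nat) (ts : List (Nat × Nat × Nat × Nat × Nat))
    (hts : ∀ t ∈ ts, t.1 = i) :
    ∀ (dp : PySem.Dict (Nat × Nat × Nat × Nat × Nat) Int) (key : Nat × Nat × Nat × Nat × Nat),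
    (ts.foldl (bodyA a) dp).getD key 0
      = dp.getD key 0 + (ts.map fun t => contribOf a (fun s => dp.getD (i, s) 0) t key).sum := by
  induction ts with
  | nil => intro dp key; simp
  | cons t rest ih =>
    intro dp key
    obtain ⟨i', less, has3, m3, m8⟩ := t
    have hi' : i = i' := (hts (i', less, has3, m3, m8) (by simp)).symm
    subst hi'
    simp only [List.foldl_cons, List.map_cons, List.sum_cons]
    have hpres : ∀ s : Nat × Nat × Nat × Nat,
        (bodyA a dp (i, less, has3, m3, m8)).getD (i, s) 0 = dp.getD (i, s) 0 := by
      intro s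
      rw [bodyA_getD, contribOf_ne a _ _ _ (by simp), add_zero]
    rw [ih (fun t ht => hts t (by simp [ht])) (bodyA a dp (i, less, has3, m3, m8)) key]
    have hfe : (fun s => (bodyA a dp (i, less, has3, m3, m8)).getD (i, s) 0)
        = (fun s => dp.getD (i, s) 0) := funext hpres
    rw [hfe, bodyA_getD]
    ring

-- ---- block evaluation ----



-- stubs of already-proven material
lemma blockIdx_eq (i : Nat) :
    blockIdx i = [0, 1].flatMap fun less => sts.map (fun s => (i, less, s)) := by
  unfold blockIdx sts
  simp [List.map_flatMap, List.map_map, Function.comp_def]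

lemma trFun_eq_step (less has3 m3 m8 : Nat) (maxD : Int) (d : Nat) :
    trFun less maxD has3 m3 m8 (d : Int)
      = ((if less = 1 ∨ (d : Int) < maxD then 1 else 0), stStep (has3, m3, m8) d) := by
  unfold trFun stStep
  refine Prod.ext rfl (Prod.ext ?_ (Prod.ext ?_ ?_))
  · simp only
    by_cases hh : has3 = 1
    · simp [hh]
    · have hd' : ((d : Int) = 3) ↔ d = 3 := by omega
      simp [hh, hd']
  · simp only
    rw [PySem.Int.mod_eq_emod_of_pos (by norm_num)]
    omega
  · simp only
    rw [PySem.Int.mod_eq_emod_of_pos (by norm_num)]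
    omega

lemma pyRange_zero_cast (K : Nat) :
    PySem.List.pyRange 0 (K : Int) 1 = (List.range K).map (fun k : Nat => (k : Int)) := by
  rw [PySem.List.pyRange_one]
  have h0 : ((K : Int) - 0).toNat = K := by omega
  rw [h0]
  exact List.map_congr_left (fun k _ => zero_add _)

-- contribution of a (less = 1) source row
lemma contrib_less1 (a : String) (i : Nat) (dpI : (Nat × Nat × Nat × Nat) → Int)
    (s : Nat × Nat × Nat) (less' : Nat) (s' : Nat × Nat × Nat) :
    contribOf a dpI (i, 1, s) (i + 1, less', s')
      = if less' = 1 then dpI (1, s) * stw s s' else 0 := by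
  unfold contribOf
  simp only [reduceIte]
  have h10 : ((9 : Int) + 1) = ((10 : Nat) : Int) := by norm_num
  rw [h10, pyRange_zero_cast, List.map_map]
  have hcong : ∀ k ∈ List.range 10,
      ((fun d => if ((i + 1, less', s') : Nat × Nat × Nat × Nat × Nat)
          = (i + 1, trFun 1 9 s.1 s.2.1 s.2.2 d) then dpI (1, s) else 0) ∘ (fun k : Nat => (k : Int))) k
        = (fun k => if less' = 1 ∧ s' = stStep s k then dpI (1, s) else 0) k := by
    intro k hk
    have hk10 : k < 10 := List.mem_range.mp hk
    simp only [Function.comp_apply]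
    rw [trFun_eq_step]
    have hbit : (if (1 : Nat) = 1 ∨ (k : Int) < 9 then (1 : Nat) else 0) = 1 := by simp
    rw [hbit]
    congr 1
    simp [Prod.ext_iff, eq_comm, and_comm]
  rw [List.map_congr_left hcong]
  by_cases hl : less' = 1
  · subst hl
    simp only [true_and]
    rw [sum_map_ite_const (List.range 10) (fun k => s' = stStep s k) (dpI (1, s))]
    unfold stw
    congr 2
    apply List.countP_congr
    intro k _
    simp [eq_comm]
  · simp [hl]

lemma contrib_less0 (a : String) (i : Nat) (dpI : (Nat × Nat × Nat × Nat) → Int)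
    (s : Nat × Nat × Nat) (less' : Nat) (s' : Nat × Nat × Nat)
    (D : Nat) (hDa : dVal a i = (D : Int)) :
    contribOf a dpI (i, 0, s) (i + 1, less', s')
      = if less' = 1 then
          dpI (0, s) * ((List.range D).countP fun d => decide (stStep s d = s') : Nat)
        else if less' = 0 then (if s' = stStep s D then dpI (0, s) else 0) else 0 := by
  unfold contribOf
  simp only
  rw [show (if (0 : Nat) = 1 then (9 : Int) else dVal a i) = dVal a i from if_neg (by decide)]
  rw [hDa]
  have hD1 : (D : Int) + 1 = ((D + 1 : Nat) : Int) := by push_cast; ring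
  rw [hD1, pyRange_zero_cast, List.map_map]
  have hcong : ∀ k ∈ List.range (D + 1),
      ((fun d => if ((i + 1, less', s') : Nat × Nat × Nat × Nat × Nat)
          = (i + 1, trFun 0 (D : Int) s.1 s.2.1 s.2.2 d) then dpI (0, s) else 0) ∘ (fun k : Nat => (k : Int))) k
        = (fun k => if less' = (if k < D then 1 else 0) ∧ s' = stStep s k then dpI (0, s) else 0) k := by
    intro k _
    simp only [Function.comp_apply]
    rw [trFun_eq_step]
    have hbit : (if (0 : Nat) = 1 ∨ (k : Int) < (D : Int) then (1 : Nat) else 0)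
        = (if k < D then 1 else 0) := by
      have : ((k : Int) < (D : Int)) ↔ k < D := by omega
      simp [this]
    rw [hbit]
    congr 1
    simp [Prod.ext_iff, and_comm]
  rw [List.map_congr_left hcong]
  by_cases hl1 : less' = 1
  · subst hl1
    rw [if_pos rfl]
    have hsimp : ∀ k ∈ List.range (D + 1),
        (fun k => if (1 : Nat) = (if k < D then 1 else 0) ∧ s' = stStep s k then dpI (0, s) else 0) k
          = (fun k => if k < D ∧ s' = stStep s k then dpI (0, s) else 0) k := by
      intro k _
      by_cases hk : k < D <;> simp [hk]
    rw [List.map_congr_left hsimp]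
    rw [List.range_succ, List.map_append, List.sum_append]
    simp only [List.map_cons, List.map_nil, List.sum_cons, List.sum_nil]
    rw [if_neg (by omega : ¬(D < D ∧ s' = stStep s D))]
    have hsimp2 : ∀ k ∈ List.range D,
        (fun k => if k < D ∧ s' = stStep s k then dpI (0, s) else 0) k
          = (fun k => if s' = stStep s k then dpI (0, s) else 0) k := by
      intro k hk
      have : k < D := List.mem_range.mp hk
      simp [this]
    rw [List.map_congr_left hsimp2, sum_map_ite_const (List.range D) (fun k => s' = stStep s k) (dpI (0, s))]
    have : ((List.range D).countP fun k => decide (s' = stStep s k))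
        = ((List.range D).countP fun d => decide (stStep s d = s')) := by
      apply List.countP_congr; intro k _; simp [eq_comm]
    rw [this]
    ring
  · rw [if_neg hl1]
    by_cases hl0 : less' = 0
    · subst hl0
      rw [if_pos rfl]
      rw [List.range_succ, List.map_append, List.sum_append]
      simp only [List.map_cons, List.map_nil, List.sum_cons, List.sum_nil]
      have hz : ((List.range D).map
          (fun k => if (0 : Nat) = (if k < D then 1 else 0) ∧ s' = stStep s k then dpI (0, s) else 0)).sum = 0 := by
        apply List.sum_eq_zero
        intro v hv
        simp only [List.mem_map] at hv
        obtain ⟨k, hk, rfl⟩ := hv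
        have : k < D := List.mem_range.mp hk
        simp [this]
      rw [hz]
      have : ((0 : Nat) = (if D < D then 1 else 0) ∧ s' = stStep s D) ↔ s' = stStep s D := by
        simp
      rw [if_congr this rfl rfl]
      ring
    · rw [if_neg hl0]
      apply List.sum_eq_zero
      intro v hv
      simp only [List.mem_map] at hv
      obtain ⟨k, _, rfl⟩ := hv
      rw [if_neg]
      rintro ⟨h1, -⟩
      by_cases hk : k < D <;> simp [hk] at h1 <;> omega

lemma block_sum (a : String) (i P D : Nat) (hD : D < 10) (hDa : dVal a i = (D : Int))
    (less' : Nat) (s' : Nat × Nat × Nat) :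
    ((blockIdx i).map fun t => contribOf a (specI P) t (i + 1, less', s')).sum
      = if less' = 1 then cnt (10 * P + D) s'
        else if less' = 0 then (if stOf (10 * P + D) = s' then (1 : Int) else 0) else 0 := by
  rw [blockIdx_eq]
  simp only [List.flatMap_cons, List.flatMap_nil, List.append_nil, List.map_append,
    List.sum_append, List.map_map, Function.comp_def]
  have h0 : ((sts.map fun s => contribOf a (specI P) (i, 0, s) (i + 1, less', s')).sum)
      = (if less' = 1 then
          (((List.range D).countP fun d => decide (stStep (stOf P) d = s') : Nat) : Int)
        else if less' = 0 then (if s' = stStep (stOf P) D then (1 : Int) else 0) else 0) := by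
    have hc : ∀ s ∈ sts, contribOf a (specI P) (i, 0, s) (i + 1, less', s')
        = (fun s => if stOf P = s then
            (if less' = 1 then (((List.range D).countP fun d => decide (stStep s d = s') : Nat) : Int)
             else if less' = 0 then (if s' = stStep s D then (1 : Int) else 0) else 0) else 0) s := by
      intro s _
      rw [contrib_less0 a i (specI P) s less' s' D hDa]
      have hsp : specI P (0, s) = if stOf P = s then 1 else 0 := by
        unfold specI; simp
      rw [hsp]
      by_cases hP : stOf P = s
      · simp only [hP, if_pos rfl, if_true]
        split_ifs <;> ring
      · simp only [hP, if_false]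
        split_ifs <;> ring
    rw [List.map_congr_left hc]
    rw [sum_ite_single sts (stOf P)
      (fun s => if less' = 1 then (((List.range D).countP fun d => decide (stStep s d = s') : Nat) : Int)
             else if less' = 0 then (if s' = stStep s D then (1 : Int) else 0) else 0)
      sts_nodup (stOf_mem_sts P)]
  have h1 : ((sts.map fun s => contribOf a (specI P) (i, 1, s) (i + 1, less', s')).sum)
      = if less' = 1 then cnt (10 * P) s' else 0 := by
    have hc : ∀ s ∈ sts, contribOf a (specI P) (i, 1, s) (i + 1, less', s')
        = (fun s => if less' = 1 then cnt P s * stw s s' else 0) s := by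
      intro s _
      rw [contrib_less1 a i (specI P) s less' s']
      have hsp : specI P (1, s) = cnt P s := by unfold specI; simp
      rw [hsp]
    rw [List.map_congr_left hc]
    by_cases hl : less' = 1
    · simp only [hl, if_true]
      exact (cnt_ten P s').symm
    · simp [hl, List.sum_eq_zero]
  rw [h0, h1]
  by_cases hl1 : less' = 1
  · simp only [hl1, if_true]
    rw [cnt_mulD P D (by omega) s']
    ring
  · rw [if_neg hl1, if_neg hl1, if_neg hl1]
    by_cases hl0 : less' = 0
    · simp only [hl0, if_true, reduceIte]
      rw [stOf_step P D hD]
      simp [eq_comm]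
    · simp [hl0]

-- ---- the invariant ----




lemma toList_toStr_nat (m : Nat) :
    (PySem.Int.toStr (m : Int)).toList = (dsOf m).map Nat.digitChar := by
  rw [PySem.Int.toList_toStr]
  unfold PySem.Int.toChars
  rw [if_neg (by omega : ¬(m : Int) < 0)]
  simp [dsOf_chars]

lemma dVal_eq (m i : Nat) (hi : i < (dsOf m).length) :
    dVal (PySem.Int.toStr (m : Int)) i = (((dsOf m).getD i 0 : Nat) : Int) := by
  unfold dVal
  rw [PySem.Str.pyGet?_natCast, toList_toStr_nat]
  rw [List.getElem?_map, List.getElem?_eq_getElem hi]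
  simp only [Option.map_some, Option.toList_some]
  rw [ofChars?_digitChar _ (dsOf_lt m _ (List.getElem_mem _))]
  rw [List.getD_eq_getElem _ _ hi]
  rfl

lemma mem_blockIdx_fst (i : Nat) : ∀ t ∈ blockIdx i, t.1 = i := by
  intro t ht
  rw [blockIdx_eq] at ht
  simp only [List.mem_flatMap, List.mem_map] at ht
  obtain ⟨less, _, s, _, rfl⟩ := ht
  rfl

lemma mem_blockIdx_iff (i : Nat) (t : Nat × Nat × Nat × Nat × Nat) :
    t ∈ blockIdx i ↔ ∃ less s, less < 2 ∧ s ∈ sts ∧ t = (i, less, s) := by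
  rw [blockIdx_eq]
  simp only [List.mem_flatMap, List.mem_map]
  constructor
  · rintro ⟨less, hless, s, hs, rfl⟩
    exact ⟨less, s, by simp at hless; omega, hs, rfl⟩
  · rintro ⟨less, s, hless, hs, rfl⟩
    exact ⟨less, by simp; omega, s, hs, rfl⟩

lemma dpUpto_zero (a : String) : dpUpto a 0 = dpInit := by
  simp [dpUpto]

lemma dpUpto_succ (a : String) (i : Nat) :
    dpUpto a (i + 1) = (blockIdx i).foldl (bodyA a) (dpUpto a i) := by
  unfold dpUpto
  rw [List.range_succ, List.flatMap_append, List.foldl_append]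
  simp

-- the full invariant
lemma dpUpto_inv (m : Nat) : ∀ i, i ≤ (dsOf m).length →
    (∀ key : Nat × Nat × Nat × Nat × Nat, i < key.1 →
        (dpUpto (PySem.Int.toStr (m : Int)) i).getD key 0 = 0)
    ∧ (∀ less s, less < 2 → s ∈ sts →
        (dpUpto (PySem.Int.toStr (m : Int)) i).getD (i, less, s) 0
          = specI (pref (dsOf m) i) (less, s)) := by
  intro i
  induction i with
  | zero =>
    intro _
    refine ⟨?_, ?_⟩
    · intro key hk
      rw [dpUpto_zero]
      unfold dpInit
      rw [PySem.Dict.getD_insert, if_neg (by intro h; rw [h] at hk; simp at hk)]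
      simp
    · intro less s hless hs
      rw [dpUpto_zero]
      unfold dpInit
      rw [PySem.Dict.getD_insert]
      have hpref : pref (dsOf m) 0 = 0 := rfl
      rw [hpref]
      unfold specI
      have hst0 : stOf 0 = (0, 0, 0) := by simp [stOf]
      rw [hst0]
      interval_cases less
      · by_cases hs0 : s = (0, 0, 0)
        · subst hs0; simp
        · simp only [Prod.mk.injEq, true_and]
          rw [if_neg hs0, if_neg (by norm_num), if_neg (fun h => hs0 h.symm)]
          simp
      · simp only [Prod.mk.injEq, true_and]
        simp [cnt]
  | succ i ih =>
    intro hi1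
    have hi : i < (dsOf m).length := by omega
    obtain ⟨ihz, ihl⟩ := ih (by omega)
    set a := PySem.Int.toStr (m : Int) with ha
    have hfold := foldl_bodyA_getD a i (blockIdx i) (mem_blockIdx_fst i) (dpUpto a i)
    have hDlt : (dsOf m).getD i 0 < 10 := by
      rw [List.getD_eq_getElem _ _ hi]
      exact dsOf_lt m _ (List.getElem_mem _)
    have hDa : dVal a i = (((dsOf m).getD i 0 : Nat) : Int) := dVal_eq m i hi
    -- replace the snapshot function by specI
    have hrepl : ∀ key, ((blockIdx i).map fun t => contribOf a (fun s => (dpUpto a i).getD (i, s) 0) t key).sum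
        = ((blockIdx i).map fun t => contribOf a (specI (pref (dsOf m) i)) t key).sum := by
      intro key
      refine congrArg List.sum (List.map_congr_left ?_)
      intro t ht
      obtain ⟨less, s, hless, hs, rfl⟩ := (mem_blockIdx_iff i t).mp ht
      unfold contribOf
      refine congrArg List.sum (List.map_congr_left ?_)
      intro d _
      have hval : (dpUpto a i).getD (i, less, s) 0 = specI (pref (dsOf m) i) (less, s) :=
        ihl less s hless hs
      simp only
      rw [hval]
    constructor
    · intro key hk
      rw [dpUpto_succ, hfold key, hrepl key]
      have h1 : (dpUpto a i).getD key 0 = 0 := ihz key (by omega)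
      have h2 : ((blockIdx i).map fun t => contribOf a (specI (pref (dsOf m) i)) t key).sum = 0 := by
        apply List.sum_eq_zero
        intro v hv
        simp only [List.mem_map] at hv
        obtain ⟨t, ht, rfl⟩ := hv
        exact contribOf_ne a _ t key (by rw [mem_blockIdx_fst i t ht]; omega)
      rw [h1, h2]
      norm_num
    · intro less s hless hs
      rw [dpUpto_succ, hfold _, hrepl _]
      have h1 : (dpUpto a i).getD (i + 1, less, s) 0 = 0 := ihz _ (by simp)
      rw [h1, block_sum a i (pref (dsOf m) i) ((dsOf m).getD i 0) hDlt hDa less s]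
      rw [← pref_succ (dsOf m) i hi]
      unfold specI
      by_cases hl : less = 1
      · subst hl; simp
      · have hl0 : less = 0 := by omega
        subst hl0
        norm_num

-- ---- final sums ----




lemma foldl_add4 {α : Type} (L : List α) (f1 f2 f3 f4 : α → Int) (init : Int) :
    L.foldl (fun r p => r + f1 p + f2 p + f3 p + f4 p) init
      = init + (L.map fun p => f1 p + f2 p + f3 p + f4 p).sum := by
  induction L generalizing init with
  | nil => simp
  | cons x t ih =>
    simp only [List.foldl_cons, List.map_cons, List.sum_cons]
    rw [ih]
    ring

lemma mem_sts_of_bounds (h3 m3 m8 : Nat) (hh : h3 < 2) (h3' : m3 < 3) (h8 : m8 < 8) :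
    ((h3, m3, m8) : Nat × Nat × Nat) ∈ sts := by
  unfold sts
  simp only [List.mem_flatMap, List.mem_map, List.mem_range]
  exact ⟨h3, by simp; omega, m3, h3', m8, h8, rfl⟩

lemma countA (m : Nat) :
    count (m : Int) = (((List.range (m + 1)).countP fun k => decide (stOf k ∈ goodSts) : Nat) : Int) := by
  have hlen : (PySem.Int.toStr (m : Int)).toList.length = (dsOf m).length := by
    rw [toList_toStr_nat]; simp
  rw [count_unfold (m : Int), hlen]
  obtain ⟨-, hlv⟩ := dpUpto_inv m (dsOf m).length le_rfl
  have hget : ∀ less h3 m3 m8 : Nat, less < 2 → h3 < 2 → m3 < 3 → m8 < 8 →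
      (dpUpto (PySem.Int.toStr (m : Int)) (dsOf m).length).getD
        ((dsOf m).length, less, h3, m3, m8) 0 = specI m (less, h3, m3, m8) := by
    intro less h3 m3 m8 h1 h2 h3' h4
    rw [hlv less (h3, m3, m8) h1 (mem_sts_of_bounds h3 m3 m8 h2 h3' h4), pref_all]
  rw [foldl_add4]
  have hfl : ([0, 1].flatMap fun less => (PySem.List.pyRange 1 8 1).map fun m8 => ((less, m8.toNat) : Nat × Nat))
      = [(0,1),(0,2),(0,3),(0,4),(0,5),(0,6),(0,7),(1,1),(1,2),(1,3),(1,4),(1,5),(1,6),(1,7)] := by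
    decide
  rw [hfl]
  simp only [List.map_cons, List.map_nil, List.sum_cons, List.sum_nil]
  simp only [hget, Nat.lt_irrefl, Nat.zero_lt_two, Nat.one_lt_two, Nat.zero_lt_succ,
    (by omega : (0:Nat) < 2), (by omega : (1:Nat) < 2), (by omega : (0:Nat) < 3),
    (by omega : (1:Nat) < 3), (by omega : (2:Nat) < 3),
    (by omega : (1:Nat) < 8), (by omega : (2:Nat) < 8), (by omega : (3:Nat) < 8),
    (by omega : (4:Nat) < 8), (by omega : (5:Nat) < 8), (by omega : (6:Nat) < 8),
    (by omega : (7:Nat) < 8)]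
  simp only [specI]
  norm_num
  rw [List.range_succ, List.countP_append]
  push_cast
  rw [(cnt_sum' m goodSts goodSts_nodup).symm]
  have h2 : ((List.countP (fun k => decide (stOf k ∈ goodSts)) [m] : Nat) : Int)
      = (goodSts.map fun s => if stOf m = s then (1 : Int) else 0).sum := by
    rw [sum_ite_mem goodSts (stOf m) goodSts_nodup]
    by_cases h : stOf m ∈ goodSts <;> simp [h]
  rw [h2]
  have hgs : goodSts = [(1,0,1),(1,1,1),(1,2,1),(0,0,1),(1,0,2),(1,1,2),(1,2,2),(0,0,2),
    (1,0,3),(1,1,3),(1,2,3),(0,0,3),(1,0,4),(1,1,4),(1,2,4),(0,0,4),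
    (1,0,5),(1,1,5),(1,2,5),(0,0,5),(1,0,6),(1,1,6),(1,2,6),(0,0,6),
    (1,0,7),(1,1,7),(1,2,7),(0,0,7)] := by decide
  rw [hgs]
  simp only [List.map_cons, List.map_nil, List.sum_cons, List.sum_nil]
  ring

-- ---- side B ----
lemma isIn_three (j : Nat) :
    PySem.Str.isIn "3" (PySem.Int.toStr (j : Int)) = true ↔ 3 ∈ Nat.digits 10 j := by
  rw [PySem.Str.isIn_iff_infix]
  have h3 : ("3" : String).toList = ['3'] := rfl
  rw [h3, toList_toStr_nat, List.singleton_infix_iff, List.mem_map]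
  constructor
  · rintro ⟨v, hv, hc⟩
    have hv10 : v < 10 := dsOf_lt j v hv
    have : v = 3 := (digitChar_eq_three v hv10).mp hc
    subst this
    by_cases hj : j = 0
    · subst hj; simp [dsOf] at hv
    · simpa [dsOf, hj] using hv
  · intro h
    refine ⟨3, ?_, rfl⟩
    have hj : j ≠ 0 := by rintro rfl; simp at h
    simp [dsOf, hj, h]

-- has-digit-3 across gluing a j-digit suffix
lemma mem_digits_pow (j : Nat) : ∀ m t : Nat, t < 10 ^ j →
    (3 ∈ Nat.digits 10 (10 ^ j * m + t) ↔ 3 ∈ Nat.digits 10 m ∨ 3 ∈ Nat.digits 10 t) := by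
  induction j with
  | zero =>
    intro m t ht
    have : t = 0 := by omega
    subst this
    simp
  | succ j ih =>
    intro m t ht
    have hsplit : 10 ^ (j + 1) * m + t = 10 * (10 ^ j * m + t / 10) + t % 10 := by
      rw [pow_succ]
      calc (10 ^ j * 10) * m + t = 10 * (10 ^ j * m) + t := by ring
        _ = 10 * (10 ^ j * m + t / 10) + t % 10 := by omega
    have htd : t / 10 < 10 ^ j := by
      apply Nat.div_lt_of_lt_mul
      rw [← pow_succ']
      exact ht
    have ht10 : t = 10 * (t / 10) + t % 10 := by omega
    rw [hsplit, mem_digits_step _ _ (by omega), ih m (t / 10) htd]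
    rw [show (3 ∈ Nat.digits 10 t ↔ 3 ∈ Nat.digits 10 (t / 10) ∨ t % 10 = 3) by
      conv_lhs => rw [ht10]
      exact mem_digits_step (t / 10) (t % 10) (by omega)]
    tauto

lemma mem_digits_1000 (m t : Nat) (ht : t < 1000) :
    3 ∈ Nat.digits 10 (1000 * m + t) ↔ 3 ∈ Nat.digits 10 m ∨ 3 ∈ Nat.digits 10 t := by
  have := mem_digits_pow 3 m t (by norm_num; omega)
  norm_num at this
  exact this

abbrev blockP (h rr t : Nat) : Prop :=
  (rr * 1000 + t) % 8 ≠ 0 ∧ ((rr * 1000 + t) % 3 = 0 ∨ h = 1 ∨ 3 ∈ Nat.digits 10 t)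

lemma goodP_block (p t : Nat) (ht : t < 1000) :
    goodP (1000 * p + t) ↔ blockP (if 3 ∈ Nat.digits 10 p then 1 else 0) (p % 24) t := by
  unfold goodP blockP
  rw [mem_digits_1000 p t ht]
  constructor
  · rintro ⟨h8, h3⟩
    refine ⟨by omega, ?_⟩
    rcases h3 with h | h | h
    · left; omega
    · right; left; simp [h]
    · right; right; exact h
  · rintro ⟨h8, h3⟩
    refine ⟨by omega, ?_⟩
    rcases h3 with h | h | h
    · left; omega
    · right; left
      by_cases hp : 3 ∈ Nat.digits 10 p
      · exact hp
      · simp [hp] at h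
    · right; right; exact h

lemma getD_foldl_insert_fn {κ ν : Type} [BEq κ] [LawfulBEq κ] [DecidableEq κ]
    (l : List κ) (f : κ → ν) (k : κ) (d0 : ν) :
    ∀ d : PySem.Dict κ ν,
    (l.foldl (fun d k' => d.insert k' (f k')) d).getD k d0
      = if k ∈ l then f k else d.getD k d0 := by
  induction l with
  | nil => intro d; simp
  | cons k' rest ih =>
    intro d
    simp only [List.foldl_cons]
    rw [ih]
    by_cases hk : k ∈ rest
    · simp [hk]
    · rw [if_neg hk, PySem.Dict.getD_insert]
      by_cases he : k = k'
      · subst he; simp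
      · rw [if_neg he, if_neg (by simp [he, hk])]

-- mirrors of count_alt's pieces (definitionally equal to its lambdas)
def cB (pr : Int × Int) : Int :=
  (PySem.List.pyRange 0 1000 1).foldl (fun c t =>
    let v := pr.2 * 1000 + t
    if PySem.Int.mod v 8 ≠ 0 ∧ (PySem.Int.mod v 3 = 0 ∨ pr.1 = 1 ∨ PySem.Str.isIn "3" (PySem.Int.toStr t)) then c + 1 else c) (0 : Int)

def prsB : List (Int × Int) :=
  (PySem.List.pyRange 0 2 1).flatMap fun h => (PySem.List.pyRange 0 24 1).map fun rr => (h, rr)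

def tblB : PySem.Dict (Int × Int) Int :=
  prsB.foldl (fun tb pr => tb.insert (pr.1, pr.2) (cB pr)) PySem.Dict.empty

lemma count_alt_unfold (x : Int) :
    count_alt x =
      (PySem.List.pyRange 0 (PySem.Int.mod (x + 1) 1000) 1).foldl (fun tot t =>
        let v := 1000 * PySem.Int.floordiv (x + 1) 1000 + t
        if PySem.Int.mod v 8 ≠ 0 ∧ (PySem.Int.mod v 3 = 0 ∨
            PySem.Str.isIn "3" (PySem.Int.toStr (PySem.Int.floordiv (x + 1) 1000)) ∨
            PySem.Str.isIn "3" (PySem.Int.toStr t)) then tot + 1 else tot)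
      ((PySem.List.pyRange 0 (PySem.Int.floordiv (x + 1) 1000) 1).foldl (fun tot p =>
        tot + tblB.getD ((if PySem.Str.isIn "3" (PySem.Int.toStr p) then (1 : Int) else 0),
          PySem.Int.mod p 24) 0) 0) := by
  unfold count_alt tblB prsB cB
  rfl

lemma tblB_getD (k : Int × Int) :
    tblB.getD k 0 = if k ∈ prsB then cB k else PySem.Dict.empty.getD k 0 := by
  have h := getD_foldl_insert_fn prsB cB k 0 PySem.Dict.empty
  rw [← h]
  rfl

lemma mem_prsB (h rr : Nat) (hh : h < 2) (hrr : rr < 24) : (((h : Int), (rr : Int))) ∈ prsB := by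
  unfold prsB
  simp only [List.mem_flatMap, List.mem_map, PySem.List.mem_pyRange_one]
  exact ⟨(h : Int), by omega, (rr : Int), by omega, rfl⟩

lemma cB_eq (h rr : Nat) :
    cB ((h : Int), (rr : Int))
      = (((List.range 1000).countP fun t => decide (blockP h rr t) : Nat) : Int) := by
  unfold cB
  rw [PySem.List.foldl_ite_add_one]
  rw [show (1000 : Int) = ((1000 : Nat) : Int) from rfl, pyRange_zero_cast, List.countP_map]
  rw [zero_add]
  congr 1
  push_cast
  apply List.countP_congr
  intro t _
  simp only [Function.comp_apply, decide_eq_true_iff]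
  unfold blockP
  have hv : ((rr : Int)) * 1000 + (t : Int) = ((rr * 1000 + t : Nat) : Int) := by push_cast; ring
  simp only [hv]
  rw [show (8 : Int) = ((8 : Nat) : Int) from rfl, show (3 : Int) = ((3 : Nat) : Int) from rfl,
    PySem.Int.mod_natCast, PySem.Int.mod_natCast]
  rw [isIn_three t]
  constructor
  · rintro ⟨h8, h3⟩
    exact ⟨by exact_mod_cast h8, by
      rcases h3 with h' | h' | h'
      · left; exact_mod_cast h'
      · right; left; exact_mod_cast h'
      · right; right; exact h'⟩
  · rintro ⟨h8, h3⟩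
    exact ⟨by exact_mod_cast h8, by
      rcases h3 with h' | h' | h'
      · left; exact_mod_cast h'
      · right; left; exact_mod_cast h'
      · right; right; exact h'⟩

lemma sum_blocks (q : Nat) :
    ((List.range q).map fun p =>
        ((((List.range 1000).countP fun t => decide (goodP (1000 * p + t))) : Nat) : Int)).sum
      = (((List.range (1000 * q)).countP fun k => decide (goodP k) : Nat) : Int) := by
  induction q with
  | zero =>
    simp only [List.range_zero, List.map_nil, List.sum_nil, Nat.mul_zero, List.countP_nil,
      Nat.cast_zero]
  | succ q ih =>
    rw [List.range_succ (n := q), List.map_append, List.sum_append, ih]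
    have hsucc : 1000 * (q + 1) = 1000 * q + 1000 := by ring
    rw [hsucc, List.range_add (n := 1000 * q) (m := 1000), List.countP_append, List.countP_map]
    simp only [List.map_cons, List.map_nil, List.sum_cons, List.sum_nil, Function.comp_def]
    push_cast
    ring

lemma countB (m : Nat) :
    count_alt (m : Int) = (((List.range (m + 1)).countP fun k => decide (goodP k) : Nat) : Int) := by
  have hq : PySem.Int.floordiv ((m : Int) + 1) 1000 = (((m + 1) / 1000 : Nat) : Int) := by
    rw [show ((m : Int) + 1) = ((m + 1 : Nat) : Int) by push_cast; ring,
      show (1000 : Int) = ((1000 : Nat) : Int) from rfl]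
    exact PySem.Int.floordiv_natCast (m + 1) 1000
  have hr : PySem.Int.mod ((m : Int) + 1) 1000 = (((m + 1) % 1000 : Nat) : Int) := by
    rw [show ((m : Int) + 1) = ((m + 1 : Nat) : Int) by push_cast; ring,
      show (1000 : Int) = ((1000 : Nat) : Int) from rfl]
    exact PySem.Int.mod_natCast (m + 1) 1000
  set qn : Nat := (m + 1) / 1000 with hqn
  set rn : Nat := (m + 1) % 1000 with hrn
  rw [count_alt_unfold, hq, hr]
  -- the block pass
  rw [PySem.List.foldl_add]
  have hblocks : ((PySem.List.pyRange 0 (qn : Int) 1).map fun p =>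
      tblB.getD ((if PySem.Str.isIn "3" (PySem.Int.toStr p) then (1 : Int) else 0),
        PySem.Int.mod p 24) 0).sum
      = (((List.range (1000 * qn)).countP fun k => decide (goodP k) : Nat) : Int) := by
    rw [pyRange_zero_cast, List.map_map]
    rw [← sum_blocks qn]
    apply congrArg List.sum
    apply List.map_congr_left
    intro p _
    simp only [Function.comp_apply]
    have hkey : ((if PySem.Str.isIn "3" (PySem.Int.toStr (p : Int)) then (1 : Int) else 0),
        PySem.Int.mod (p : Int) 24)
        = (((if 3 ∈ Nat.digits 10 p then 1 else 0 : Nat) : Int), ((p % 24 : Nat) : Int)) := by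
      refine Prod.ext ?_ ?_
      · simp only
        by_cases h3 : 3 ∈ Nat.digits 10 p
        · rw [if_pos ((isIn_three p).mpr h3), if_pos h3]; rfl
        · rw [if_neg (fun hc => h3 ((isIn_three p).mp hc)), if_neg h3]; rfl
      · simp only
        rw [show (24 : Int) = ((24 : Nat) : Int) from rfl]
        exact PySem.Int.mod_natCast p 24
    rw [hkey, tblB_getD,
      if_pos (mem_prsB _ _ (by split <;> omega) (by omega)), cB_eq]
    congr 1
    apply List.countP_congr
    intro t ht
    have ht1000 : t < 1000 := List.mem_range.mp ht
    simp only [decide_eq_true_iff]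
    exact (goodP_block p t ht1000).symm
  rw [hblocks]
  -- the remainder pass
  rw [PySem.List.foldl_ite_add_one]
  rw [pyRange_zero_cast rn, List.countP_map]
  have hrem : ((List.range rn).countP
      (((fun t => decide (PySem.Int.mod (1000 * ((qn : Nat) : Int) + t) 8 ≠ 0 ∧
        (PySem.Int.mod (1000 * ((qn : Nat) : Int) + t) 3 = 0 ∨
          PySem.Str.isIn "3" (PySem.Int.toStr ((qn : Nat) : Int)) = true ∨
          PySem.Str.isIn "3" (PySem.Int.toStr t) = true))) ∘ fun k : Nat => (k : Int))))
      = ((List.range rn).countP fun t => decide (goodP (1000 * qn + t))) := by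
    apply List.countP_congr
    intro t ht
    have ht1000 : t < 1000 := by
      have := List.mem_range.mp ht
      have : rn < 1000 := Nat.mod_lt _ (by norm_num)
      omega
    simp only [Function.comp_apply, decide_eq_true_iff]
    have hv : (1000 : Int) * ((qn : Nat) : Int) + ((t : Nat) : Int)
        = ((1000 * qn + t : Nat) : Int) := by push_cast; ring
    rw [hv, show (8 : Int) = ((8 : Nat) : Int) from rfl, show (3 : Int) = ((3 : Nat) : Int) from rfl,
      PySem.Int.mod_natCast, PySem.Int.mod_natCast, isIn_three qn, isIn_three t]
    unfold goodP
    rw [mem_digits_1000 qn t ht1000]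
    simp only [ne_eq, Nat.cast_eq_zero]
  rw [hrem]
  have hsplit : m + 1 = 1000 * qn + rn := by
    rw [hqn, hrn]; omega
  rw [hsplit, List.range_add, List.countP_append, List.countP_map]
  simp only [Function.comp_def]
  rw [Nat.mul_comm 1000 qn]
  push_cast
  ring

-- ===== VERDICT (by name: the statement is the Claim_ definition above) =====
theorem count_spec : Claim_equal_count := by
  intro x _ hx
  unfold Pre_count at hx
  unfold Spec_count
  obtain ⟨m, rfl⟩ : ∃ m : Nat, x = (m : Int) := ⟨x.toNat, (Int.toNat_of_nonneg hx).symm⟩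
  rw [countA m, countB m]
  have hcp : ((List.range (m + 1)).countP fun k => decide (stOf k ∈ goodSts))
      = ((List.range (m + 1)).countP fun k => decide (goodP k)) := by
    apply List.countP_congr
    intro k _
    simp only [decide_eq_true_iff]
    exact stOf_mem_goodSts k
  rw [hcp]
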